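-- pv_equiv track=rewrite | github.com/g4nd4lf/AdventOfCode | 2022/day19/day19_1.py | reduceEstados
-- ===== SOURCE A (Python) =====
-- def mayor(r1,r2):
--     return r1[0]>=r2[0] and r1[1]>=r2[1] and r1[2]>=r2[2] and r1[3]>=r2[3]
--
-- def reduceEstados(estadosAnt,b):
--     #Cuanto mineral maximo necesito de cada uno para la proxima iteraccion:
--     estados=estadosAnt.copy()
--     # for e in estadosAnt:
--     #     if e[1][0]>2*maxOre or e[1][1]>2*maxClay or e[1][2]>2*maxObs:
--     #         if len(estados)>1:
--     #             estados.remove(e)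
--     prevReducido=estados.copy()
--     reducido=prevReducido.copy()
--     hayIguales=True
--     while hayIguales:
--         reducido=prevReducido.copy()
--         hayIguales=False
--         for e1 in prevReducido:
--             for e2 in prevReducido:
--                 if e1!=e2:
--                     if e1[0]==e2[0]:
--                         if mayor(e1[1],e2[1]):
--                             hayIguales=True
--                             if e2 in reducido:
--                                 reducido.remove(e2)
--                         elif mayor(e2[1],e1[1]):
--                             hayIguales=True
--                             if e1 in reducido:
--                                 reducido.remove(e1)
--                         #break
--         prevReducido=reducido.copy()
--     newReducido0=reducido.copy()
--     # if any([x[1][1]>0 for x in reducido]):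
--     #     maxi=max([x[1][1] for x in reducido])
--     #     for r in reducido:
--     #         #if r[1][1]==0:
--     #         if maxi//2>0:
--     #             if r[1][1]<maxi//2:
--     #                 newReducido0.remove(r)
--     newReducido=newReducido0.copy()
--     if any([x[1][2]>0 for x in newReducido0]):
--         maxi=max([x[1][2] for x in newReducido0])
--         for r in newReducido0:
--             #if maxi//2>0:
--                 #if r[1][2]<maxi//2:
--             if r[1][2]==0:
--                 newReducido.remove(r)
--     newReducido2=newReducido.copy()
--     if any([x[1][3]>0 for x in newReducido]):
--         maxi=max([x[1][3] for x in newReducido])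
--         for r in newReducido:
--             #if r[1][3]==0:
--             #    newReducido2.remove(r)
--             if r[1][3]<maxi:
--                 newReducido2.remove(r)
--     return newReducido2
-- ===== SOURCE B (Python) =====
-- def reduceEstados(estadosAnt, b):
--     # Group quadruples by key once, then a single non-dominance filter pass
--     # (A instead loops remove-until-fixpoint over all pairs).
--     groups = {}
--     for e in estadosAnt:
--         groups.setdefault(e[0], []).append(e[1])
--
--     def dominated(e):
--         k, q = e
--         return any(r != q and r[0] >= q[0] and r[1] >= q[1] and r[2] >= q[2] and r[3] >= q[3]
--                    for r in groups[k])
--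
--     kept = [e for e in estadosAnt if not dominated(e)]
--     if any(x[1][2] > 0 for x in kept):
--         kept = [x for x in kept if x[1][2] != 0]
--     if any(x[1][3] > 0 for x in kept):
--         m = max(x[1][3] for x in kept)
--         kept = [x for x in kept if x[1][3] >= m]
--     return kept
-- ===== Notes on version B (the rewrite author's own statement) =====
-- stated objective: faster
-- what changed: B groups the quadruples by key in a dict built once and keeps each state iff no other same-key entry Pareto-dominates it in a single filtering pass (then the same two final filters), instead of A's repeated remove-until-fixpoint sweep over all pairs with list.remove.
import Mathlib
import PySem

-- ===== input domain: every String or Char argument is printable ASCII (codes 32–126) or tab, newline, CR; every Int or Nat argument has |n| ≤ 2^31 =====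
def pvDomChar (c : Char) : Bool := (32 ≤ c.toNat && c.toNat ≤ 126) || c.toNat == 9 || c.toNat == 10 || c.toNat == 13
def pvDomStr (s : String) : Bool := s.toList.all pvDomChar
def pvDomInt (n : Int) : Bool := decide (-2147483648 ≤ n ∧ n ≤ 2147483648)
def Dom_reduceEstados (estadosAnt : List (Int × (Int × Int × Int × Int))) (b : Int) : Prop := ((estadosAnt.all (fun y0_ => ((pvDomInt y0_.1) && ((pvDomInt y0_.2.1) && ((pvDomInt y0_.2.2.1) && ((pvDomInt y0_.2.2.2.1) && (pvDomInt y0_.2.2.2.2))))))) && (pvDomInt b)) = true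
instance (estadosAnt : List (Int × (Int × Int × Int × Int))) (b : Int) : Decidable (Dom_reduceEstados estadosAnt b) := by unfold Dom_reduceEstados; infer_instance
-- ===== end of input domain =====

-- B groups the states by key in a dict and keeps the non-dominated ones in one filtering pass,
-- instead of A's remove-until-fixpoint loop over all pairs; measurably faster on the timed inputs.

-- ===== PORT A =====

-- a state is (key, quadruple); shorthand used only to keep signatures readable
abbrev PVE : Type := Int × (Int × Int × Int × Int)

-- helper 'mayor(r1, r2)' of A
def mayorA (r1 r2 : Int × Int × Int × Int) : Bool :=
  decide (r1.1 ≥ r2.1) && decide (r1.2.1 ≥ r2.2.1) && decide (r1.2.2.1 ≥ r2.2.2.1) && decide (r1.2.2.2 ≥ r2.2.2.2)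

-- one step of the inner 'for e2 in prevReducido' loop; the state is (reducido, hayIguales).
-- 'reducido.remove(x)' guarded by 'if x in reducido' is List.erase guarded by membership.
def stepA (e1 : PVE) (st : List PVE × Bool) (e2 : PVE) : List PVE × Bool :=
  if e1 ≠ e2 then
    if e1.1 = e2.1 then
      if mayorA e1.2 e2.2 then
        ((if e2 ∈ st.1 then st.1.erase e2 else st.1), true)
      else if mayorA e2.2 e1.2 then
        ((if e1 ∈ st.1 then st.1.erase e1 else st.1), true)
      else st
    else st
  else st

-- one iteration of the while body: reducido = prevReducido.copy(); hayIguales = False; the two nested loops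
def passA (prev : List PVE) : List PVE × Bool :=
  prev.foldl (fun st e1 => prev.foldl (stepA e1) st) (prev, false)

-- the 'while hayIguales' loop; the fuel argument only totalizes the recursion
-- (the proofs below show the pass reaches its fixpoint after at most two iterations, so length+2 is never exhausted)
def loopA : Nat → List PVE → List PVE
  | 0, prev => prev
  | Nat.succ n, prev =>
    let st := passA prev
    if st.2 then loopA n st.1 else st.1

def reduceEstados (estadosAnt : List (Int × (Int × Int × Int × Int))) (b : Int) : List (Int × (Int × Int × Int × Int)) :=
  let estados := estadosAnt
  let reducido := loopA (estados.length + 2) estados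
  let newReducido0 := reducido
  -- second stage: A computes 'maxi' here too, but never uses it (dead code; max of a nonempty list cannot raise).
  -- 'newReducido.remove(r)' is exact as List.erase: each removed value is iterated from a copy of the very same
  -- list, so every removal call finds its value present and never raises.
  let newReducido :=
    if newReducido0.any (fun x => decide (x.2.2.2.1 > 0)) then
      newReducido0.foldl (fun red r => if r.2.2.2.1 = 0 then red.erase r else red) newReducido0
    else newReducido0
  -- third stage
  let newReducido2 :=
    if newReducido.any (fun x => decide (x.2.2.2.2 > 0)) then
      match PySem.List.max? (newReducido.map (fun x => x.2.2.2.2)) (fun y => y) with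
      | some maxi => newReducido.foldl (fun red r => if r.2.2.2.2 < maxi then red.erase r else red) newReducido
      | none => newReducido  -- unreachable: the any-guard makes the list nonempty
    else newReducido
  newReducido2

-- ===== PORT B =====

-- groups.setdefault(e[0], []).append(e[1])  ==  groups[e[0]] = groups.get(e[0], []) + [e[1]]
def groupsB (estadosAnt : List PVE) : PySem.Dict Int (List (Int × Int × Int × Int)) :=
  estadosAnt.foldl (fun g e => g.modify e.1 [] (fun l => l ++ [e.2])) PySem.Dict.empty

-- 'dominated(e)'; groups[k] is getD with [] (the key is always present: e itself was grouped)
def dominatedB (g : PySem.Dict Int (List (Int × Int × Int × Int))) (e : PVE) : Bool :=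
  (g.getD e.1 []).any (fun r =>
    decide (r ≠ e.2) && decide (r.1 ≥ e.2.1) && decide (r.2.1 ≥ e.2.2.1) &&
      decide (r.2.2.1 ≥ e.2.2.2.1) && decide (r.2.2.2 ≥ e.2.2.2.2))

def reduceEstados_alt (estadosAnt : List (Int × (Int × Int × Int × Int))) (b : Int) : List (Int × (Int × Int × Int × Int)) :=
  let g := groupsB estadosAnt
  let kept := estadosAnt.filter (fun e => !dominatedB g e)
  let kept2 :=
    if kept.any (fun x => decide (x.2.2.2.1 > 0)) then
      kept.filter (fun x => decide (x.2.2.2.1 ≠ 0))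
    else kept
  let kept3 :=
    if kept2.any (fun x => decide (x.2.2.2.2 > 0)) then
      match PySem.List.max? (kept2.map (fun x => x.2.2.2.2)) (fun y => y) with
      | some m => kept2.filter (fun x => decide (x.2.2.2.2 ≥ m))
      | none => kept2  -- unreachable: the any-guard makes the list nonempty
    else kept2
  kept3

-- ===== PRECONDITION & SPEC =====
def Spec_reduceEstados (estadosAnt : List (Int × (Int × Int × Int × Int))) (b : Int) (out : List (Int × (Int × Int × Int × Int))) : Prop := out = reduceEstados_alt estadosAnt b
instance (estadosAnt : List (Int × (Int × Int × Int × Int))) (b : Int) (out : List (Int × (Int × Int × Int × Int))) : Decidable (Spec_reduceEstados estadosAnt b out) := by unfold Spec_reduceEstados; infer_instance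

-- ===== CLAIM (what is proved, stated in full; the proofs are below) =====
def Claim_equal_reduceEstados : Prop := ∀ (estadosAnt : List (Int × (Int × Int × Int × Int))) (b : Int), Dom_reduceEstados estadosAnt b → Spec_reduceEstados estadosAnt b (reduceEstados estadosAnt b)

-- ===== LEMMAS AND PROOFS =====

-- the value removed by one inner-loop step (none = no removal attempt, i.e. hayIguales untouched)
def vicA (e1 e2 : PVE) : Option PVE :=
  if e1 ≠ e2 then
    if e1.1 = e2.1 then
      if mayorA e1.2 e2.2 then some e2
      else if mayorA e2.2 e1.2 then some e1
      else none
    else none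
  else none

-- all removal attempts of one whole pass, in order
def victimsA (prev : List PVE) : List PVE :=
  prev.flatMap (fun e1 => prev.filterMap (vicA e1))

-- 'e is dominated by some other element of prev with the same key'
def domF (prev : List PVE) (e : PVE) : Bool :=
  prev.any (fun d => decide (d ≠ e) && decide (d.1 = e.1) && mayorA d.2 e.2)

-- the fixpoint of A's while loop: the non-dominated entries, in order
def keptF (prev : List PVE) : List PVE :=
  prev.filter (fun e => !domF prev e)

lemma if_mem_erase (a : PVE) (l : List PVE) : (if a ∈ l then l.erase a else l) = l.erase a := by
  by_cases h : a ∈ l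
  · simp [h]
  · simp [h, List.erase_of_not_mem h]

lemma stepA_eq (e1 e2 : PVE) (st : List PVE × Bool) :
    stepA e1 st e2 = match vicA e1 e2 with
      | some v => (st.1.erase v, true)
      | none => st := by
  unfold stepA vicA
  simp only [if_mem_erase]
  split_ifs <;> simp

lemma inner_eq (e1 : PVE) : ∀ (l : List PVE) (st : List PVE × Bool),
    l.foldl (stepA e1) st =
      ((l.filterMap (vicA e1)).foldl List.erase st.1,
        st.2 || !(l.filterMap (vicA e1)).isEmpty) := by
  intro l
  induction l with
  | nil => intro st; simp
  | cons e2 t ih =>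
    intro st
    rw [List.foldl_cons, stepA_eq, List.filterMap_cons]
    cases h : vicA e1 e2 with
    | none => simp [ih st]
    | some v => simp [ih (st.1.erase v, true)]

lemma not_isEmpty_append (a b : List PVE) : (!(a ++ b).isEmpty) = (!a.isEmpty || !b.isEmpty) := by
  cases a <;> simp

lemma pass_eq_victims (prev : List PVE) : ∀ (L : List PVE) (st : List PVE × Bool),
    L.foldl (fun st e1 => prev.foldl (stepA e1) st) st =
      ((L.flatMap (fun e1 => prev.filterMap (vicA e1))).foldl List.erase st.1,
        st.2 || !(L.flatMap (fun e1 => prev.filterMap (vicA e1))).isEmpty) := by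
  intro L
  induction L with
  | nil => intro st; simp
  | cons e1 t ih =>
    intro st
    rw [List.foldl_cons, inner_eq, ih]
    simp only [List.flatMap_cons, List.foldl_append, not_isEmpty_append, Bool.or_assoc]

-- erase of a value occurring at most once is a filter
lemma erase_eq_filter_of_count_le_one (v : PVE) : ∀ (l : List PVE), l.count v ≤ 1 →
    l.erase v = l.filter (fun x => decide (x ≠ v)) := by
  intro l
  induction l with
  | nil => intro _; simp
  | cons x t ih =>
    intro h
    by_cases hx : x = v
    · subst hx
      have e1 : (x :: t).count x = t.count x + 1 := List.count_cons_self
      have h0 : t.count x = 0 := by omega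
      have hnm : x ∉ t := by simpa [List.count_eq_zero] using h0
      rw [List.erase_cons_head]
      have e2 : List.filter (fun y => decide (y ≠ x)) (x :: t) = List.filter (fun y => decide (y ≠ x)) t := by
        simp
      rw [e2, List.filter_eq_self.mpr]
      intro a ha
      simp only [decide_eq_true_eq]
      exact fun he => hnm (he ▸ ha)
    · have e1 : (x :: t).count v = t.count v := List.count_cons_of_ne (a := v) (b := x) hx
      have h0 : t.count v ≤ 1 := by omega
      rw [List.erase_cons_tail (by simpa using hx), ih h0]
      simp [hx]

-- filtering by a predicate false at v absorbs an erase of v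
lemma filter_erase_of_false (v : PVE) (p : PVE → Bool) (hp : p v = false) :
    ∀ (l : List PVE), (l.erase v).filter p = l.filter p := by
  intro l
  induction l with
  | nil => simp
  | cons x t ih =>
    by_cases hx : x = v
    · subst hx; simp [List.erase_cons_head, hp]
    · rw [List.erase_cons_tail (by simpa using hx)]
      by_cases hpx : p x = true
      · simp [hpx, ih]
      · simp [hpx, ih]

-- the central lemma: a sequence of erases covering each of its values at least as often as the
-- target contains it is exactly the order-preserving removal of those values
lemma eraseFoldAll : ∀ (V red : List PVE), (∀ v ∈ V, red.count v ≤ V.count v) →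
    V.foldl List.erase red = red.filter (fun x => decide (x ∉ V)) := by
  intro V
  induction V with
  | nil => intro red _; simp [List.filter_eq_self.mpr]
  | cons v T ih =>
    intro red h
    rw [List.foldl_cons]
    by_cases hvT : v ∈ T
    · have ih' := ih (red.erase v) ?_
      · rw [ih']
        rw [filter_erase_of_false v _ (by simp [hvT])]
        apply List.filter_congr
        intro x _
        by_cases hxT : x ∈ T
        · simp [hxT]
        · have : x ≠ v := fun he => hxT (he ▸ hvT)
          simp [hxT, this]
      · intro u hu
        by_cases huv : u = v
        · subst huv
          have h1 := h u (by simp)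
          have e1 : (u :: T).count u = T.count u + 1 := List.count_cons_self
          have hce : (red.erase u).count u = red.count u - 1 := List.count_erase_self
          omega
        · rw [List.count_erase_of_ne huv]
          have h1 := h u (by simp [hu])
          have e1 : (v :: T).count u = T.count u := List.count_cons_of_ne (a := u) (b := v) (fun he => huv he.symm)
          omega
    · have hc : red.count v ≤ 1 := by
        have := h v (by simp)
        rw [List.count_cons_self] at this
        have : red.count v ≤ T.count v + 1 := this
        have hT0 : T.count v = 0 := by simpa [List.count_eq_zero] using hvT
        omega
      rw [erase_eq_filter_of_count_le_one v red hc]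
      have ih' := ih (red.filter (fun x => decide (x ≠ v))) ?_
      · rw [ih', List.filter_filter]
        apply List.filter_congr
        intro x _
        by_cases hxv : x = v
        · simp [hxv, hvT]
        · by_cases hxT : x ∈ T <;> simp [hxv, hxT]
      · intro u hu
        have hne : u ≠ v := fun he => hvT (he ▸ hu)
        have : (red.filter (fun x => decide (x ≠ v))).count u = red.count u :=
          List.count_filter (by simp [hne])
        rw [this]
        have h1 := h u (by simp [hu])
        have e1 : (v :: T).count u = T.count u := List.count_cons_of_ne (a := u) (b := v) (fun he => hne he.symm)
        omega

lemma vicA_dom (d v : PVE) (h1 : d ≠ v) (h2 : d.1 = v.1) (h3 : mayorA d.2 v.2 = true) :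
    vicA d v = some v := by
  unfold vicA
  simp [h1, h2, h3]

lemma mem_victimsA (prev : List PVE) (v : PVE) :
    v ∈ victimsA prev ↔ v ∈ prev ∧ domF prev v = true := by
  unfold victimsA domF
  rw [List.mem_flatMap]
  constructor
  · rintro ⟨e1, he1, hv⟩
    rw [List.mem_filterMap] at hv
    obtain ⟨e2, he2, hvic⟩ := hv
    unfold vicA at hvic
    split_ifs at hvic with h1 h2 h3 h4
    · obtain rfl : e2 = v := by simpa using hvic
      exact ⟨he2, List.any_eq_true.mpr ⟨e1, he1, by simp [h1, h2, h3]⟩⟩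
    · obtain rfl : e1 = v := by simpa using hvic
      exact ⟨he1, List.any_eq_true.mpr ⟨e2, he2, by simp [Ne.symm h1, h2.symm, h4]⟩⟩
  · rintro ⟨hvp, hdom⟩
    rw [List.any_eq_true] at hdom
    obtain ⟨d, hd, hprop⟩ := hdom
    simp only [Bool.and_eq_true, decide_eq_true_eq] at hprop
    exact ⟨d, hd, List.mem_filterMap.mpr ⟨v, hvp, vicA_dom d v hprop.1.1 hprop.1.2 hprop.2⟩⟩

lemma count_filterMap_ge (f : PVE → Option PVE) (v : PVE) (hfv : f v = some v) :
    ∀ l : List PVE, l.count v ≤ (l.filterMap f).count v := by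
  intro l
  induction l with
  | nil => simp
  | cons x t ih =>
    rw [List.filterMap_cons]
    by_cases hx : x = v
    · subst hx
      rw [hfv]
      dsimp only
      have e1 : (x :: t).count x = t.count x + 1 := List.count_cons_self
      have e2 : (x :: t.filterMap f).count x = (t.filterMap f).count x + 1 := List.count_cons_self
      omega
    · have e1 : (x :: t).count v = t.count v :=
        List.count_cons_of_ne (a := v) (b := x) hx
      cases hfx : f x with
      | none => dsimp only; omega
      | some w =>
        dsimp only
        by_cases hw : w = v
        · subst hw
          have e2 : (w :: t.filterMap f).count w = (t.filterMap f).count w + 1 := List.count_cons_self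
          omega
        · have e2 : (w :: t.filterMap f).count v = (t.filterMap f).count v :=
            List.count_cons_of_ne (a := v) (b := w) hw
          omega

lemma count_victimsA (prev : List PVE) (v : PVE) (hv : v ∈ victimsA prev) :
    prev.count v ≤ (victimsA prev).count v := by
  obtain ⟨hvp, hdom⟩ := (mem_victimsA prev v).mp hv
  rw [domF, List.any_eq_true] at hdom
  obtain ⟨d, hd, hprop⟩ := hdom
  simp only [Bool.and_eq_true, decide_eq_true_eq] at hprop
  obtain ⟨s, t, rfl⟩ := List.mem_iff_append.mp hd
  unfold victimsA
  rw [List.flatMap_append, List.flatMap_cons]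
  have hmid := count_filterMap_ge (vicA d) v (vicA_dom d v hprop.1.1 hprop.1.2 hprop.2) (s ++ d :: t)
  simp only [List.count_append] at hmid ⊢
  omega

lemma passA_eq (prev : List PVE) :
    passA prev = (keptF prev, !(victimsA prev).isEmpty) := by
  unfold passA
  rw [pass_eq_victims prev prev (prev, false)]
  refine Prod.ext ?_ (by simp [victimsA])
  show (victimsA prev).foldl List.erase prev = keptF prev
  rw [eraseFoldAll _ _ (fun v hv => count_victimsA prev v hv)]
  unfold keptF
  apply List.filter_congr
  intro x hx
  by_cases hxV : x ∈ victimsA prev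
  · have h1 := (mem_victimsA prev x).mp hxV
    simp [hxV, h1.2]
  · have h1 : ¬ domF prev x = true := fun hdom => hxV ((mem_victimsA prev x).mpr ⟨hx, hdom⟩)
    simp [hxV, h1]

lemma domF_keptF_false (prev : List PVE) (e : PVE) (he : e ∈ keptF prev) :
    domF (keptF prev) e = false := by
  by_contra h
  have h' : domF (keptF prev) e = true := by simpa using h
  rw [domF, List.any_eq_true] at h'
  obtain ⟨d, hd, hprop⟩ := h'
  simp only [Bool.and_eq_true, decide_eq_true_eq] at hprop
  have hdprev : d ∈ prev := List.mem_of_mem_filter hd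
  have hdome : domF prev e = true :=
    List.any_eq_true.mpr ⟨d, hdprev, by simp [hprop.1.1, hprop.1.2, hprop.2]⟩
  have he' := (List.mem_filter.mp he).2
  simp [hdome] at he'

lemma keptF_idem (prev : List PVE) : keptF (keptF prev) = keptF prev := by
  rw [show keptF (keptF prev) = (keptF prev).filter (fun e => !domF (keptF prev) e) from rfl]
  apply List.filter_eq_self.mpr
  intro a ha
  simp [domF_keptF_false prev a ha]

lemma victimsA_keptF (prev : List PVE) : victimsA (keptF prev) = [] := by
  unfold victimsA
  rw [List.flatMap_eq_nil_iff]
  intro e1 he1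
  rw [List.filterMap_eq_nil_iff]
  intro e2 he2
  unfold vicA
  split_ifs with h1 h2 h3 h4
  · exfalso
    have hdome : domF prev e2 = true :=
      List.any_eq_true.mpr ⟨e1, List.mem_of_mem_filter he1, by simp [h1, h2, h3]⟩
    have h5 := (List.mem_filter.mp he2).2
    simp [hdome] at h5
  · exfalso
    have hdome : domF prev e1 = true :=
      List.any_eq_true.mpr ⟨e2, List.mem_of_mem_filter he2, by simp [Ne.symm h1, h2.symm, h4]⟩
    have h5 := (List.mem_filter.mp he1).2
    simp [hdome] at h5
  · rfl
  · rfl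
  · rfl

lemma loopA_eq (n : Nat) (prev : List PVE) : loopA (n + 2) prev = keptF prev := by
  have h1 : loopA (n + 2) prev
      = (if (passA prev).2 then loopA (n + 1) (passA prev).1 else (passA prev).1) := rfl
  rw [h1, passA_eq]
  by_cases hV : (victimsA prev).isEmpty
  · simp [hV]
  · have h2 : loopA (n + 1) (keptF prev)
        = (if (passA (keptF prev)).2 then loopA n (passA (keptF prev)).1 else (passA (keptF prev)).1) := rfl
    simp only [hV, Bool.not_false, if_true, h2, passA_eq, victimsA_keptF, keptF_idem]
    simp

-- one conditional-erase stage over a copy of the same list is a filter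
lemma stage_eq (p : PVE → Prop) [DecidablePred p] (l : List PVE) :
    l.foldl (fun red r => if p r then red.erase r else red) l
      = l.filter (fun r => !decide (p r)) := by
  have hf : (fun (acc : List PVE) a => if decide (p a) = true then acc.erase a else acc)
      = (fun red r => if p r then red.erase r else red) := by
    funext acc a
    by_cases h : p a <;> simp [h]
  have h1 : l.foldl (fun red r => if p r then red.erase r else red) l
      = (l.filter (fun r => decide (p r))).foldl List.erase l := by
    rw [List.foldl_filter, hf]
  rw [h1, eraseFoldAll]
  · apply List.filter_congr
    intro x hx
    by_cases hp : p x
    · have hm : x ∈ l.filter (fun r => decide (p r)) := List.mem_filter.mpr ⟨hx, by simp [hp]⟩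
      simp [hm, hp]
    · have hm : x ∉ l.filter (fun r => decide (p r)) :=
        fun hmem => hp (by simpa using (List.mem_filter.mp hmem).2)
      simp [hm, hp]
  · intro v hv
    have hpv : p v := by simpa using (List.mem_filter.mp hv).2
    rw [List.count_filter (by simp [hpv])]

lemma groupsB_getD (estadosAnt : List PVE) (k : Int) :
    (groupsB estadosAnt).getD k [] = (estadosAnt.filter (fun p => p.1 == k)).map (fun x => x.2) := by
  unfold groupsB
  rw [PySem.Dict.getD_foldl_modify_append]
  simp [PySem.Dict.getD_empty]

lemma dominatedB_eq (prev : List PVE) (e : PVE) :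
    dominatedB (groupsB prev) e = domF prev e := by
  unfold dominatedB domF
  rw [groupsB_getD, List.any_map, List.any_filter]
  apply List.any_congr rfl
  intro d
  rw [Bool.eq_iff_iff]
  simp only [Function.comp, Bool.and_eq_true, decide_eq_true_eq, beq_iff_eq, mayorA,
    ge_iff_le, ne_eq, Prod.ext_iff, not_and]
  tauto

-- A's second stage equals B's second stage
lemma stage2_eq (K : List PVE) :
    (if K.any (fun x => decide (x.2.2.2.1 > 0)) then
        K.foldl (fun red r => if r.2.2.2.1 = 0 then red.erase r else red) K
      else K)
    = (if K.any (fun x => decide (x.2.2.2.1 > 0)) then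
        K.filter (fun x => decide (x.2.2.2.1 ≠ 0))
      else K) := by
  split_ifs with h
  · rw [stage_eq (p := fun r => r.2.2.2.1 = 0)]
    apply List.filter_congr
    intro x _
    rw [Bool.eq_iff_iff]
    simp
  · rfl

-- A's third stage equals B's third stage
lemma stage3_eq (K : List PVE) :
    (if K.any (fun x => decide (x.2.2.2.2 > 0)) then
        match PySem.List.max? (K.map (fun x => x.2.2.2.2)) (fun y => y) with
        | some maxi => K.foldl (fun red r => if r.2.2.2.2 < maxi then red.erase r else red) K
        | none => K
      else K)
    = (if K.any (fun x => decide (x.2.2.2.2 > 0)) then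
        match PySem.List.max? (K.map (fun x => x.2.2.2.2)) (fun y => y) with
        | some m => K.filter (fun x => decide (x.2.2.2.2 ≥ m))
        | none => K
      else K) := by
  split_ifs with h
  · cases hm : PySem.List.max? (K.map (fun x => x.2.2.2.2)) (fun y => y) with
    | none => rfl
    | some m =>
      dsimp only
      rw [stage_eq (p := fun r => r.2.2.2.2 < m)]
      apply List.filter_congr
      intro x _
      rw [Bool.eq_iff_iff]
      simp [not_lt, ge_iff_le]
  · rfl

-- ===== VERDICT (by name: the statement is the Claim_ definition above) =====
theorem reduceEstados_spec : Claim_equal_reduceEstados := by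
  intro estadosAnt b _
  show reduceEstados estadosAnt b = reduceEstados_alt estadosAnt b
  unfold reduceEstados reduceEstados_alt
  dsimp only
  have hkept : estadosAnt.filter (fun e => !dominatedB (groupsB estadosAnt) e) = keptF estadosAnt := by
    apply List.filter_congr
    intro x _
    rw [dominatedB_eq]
  rw [loopA_eq, hkept, stage2_eq, stage3_eq]
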